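-- pv_equiv track=rewrite | github.com/UlissePalmi/Quant_Project | src/risk_factor_pred/core/htmlCleaner.py | merge_item_with_number_line
-- ===== SOURCE A (Python) =====
-- def merge_item_with_number_line(text: str) -> str: # If a line is just 'Item'/'Items' and the following line starts with a number merges them
--     lines = text.splitlines()
--     new_lines = []
--     i = 0
--
--     while i < len(lines):
--         current = lines[i].strip()
--
--         # Check if this line is exactly 'Item' or 'Items'
--         if current in ("Item", "Items") and i + 1 < len(lines):
--             next_raw = lines[i + 1]
--             # Remove leading spaces to inspect the first real character
--             next_stripped_leading = next_raw.lstrip()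
--
--             # Check if next line starts with a digit
--             if next_stripped_leading and next_stripped_leading[0].isdigit():
--                 # Merge: 'Item' + space + next line (without leading spaces)
--                 merged = f"{current} {next_stripped_leading}"
--                 new_lines.append(merged)
--                 i += 2  # skip the next line (already merged)
--                 continue
--
--         # Default: keep line as-is
--         new_lines.append(lines[i])
--         i += 1
--
--     return "\n".join(new_lines)
-- ===== SOURCE B (Python) =====
-- def merge_item_with_number_line(text: str) -> str:
--     # Single look-back pass: append each raw line; when a line starts with a digit
--     # and the previously appended raw line strips to 'Item'/'Items', replace that
--     # entry by the merged line instead of peeking ahead with an index.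
--     result = []
--     for line in text.splitlines():
--         ls = line.lstrip()
--         if ls and ls[0].isdigit() and result and result[-1].strip() in ("Item", "Items"):
--             result[-1] = f"{result[-1].strip()} {ls}"
--         else:
--             result.append(line)
--     return "\n".join(result)
-- ===== Notes on version B (the rewrite author's own statement) =====
-- stated objective: simpler
-- what changed: Replaced the index-based while loop with look-ahead and i+=2 skipping by a single forward fold that appends raw lines and, when a digit-starting line arrives, looks back at the last appended entry and merges in place.
import Mathlib
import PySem

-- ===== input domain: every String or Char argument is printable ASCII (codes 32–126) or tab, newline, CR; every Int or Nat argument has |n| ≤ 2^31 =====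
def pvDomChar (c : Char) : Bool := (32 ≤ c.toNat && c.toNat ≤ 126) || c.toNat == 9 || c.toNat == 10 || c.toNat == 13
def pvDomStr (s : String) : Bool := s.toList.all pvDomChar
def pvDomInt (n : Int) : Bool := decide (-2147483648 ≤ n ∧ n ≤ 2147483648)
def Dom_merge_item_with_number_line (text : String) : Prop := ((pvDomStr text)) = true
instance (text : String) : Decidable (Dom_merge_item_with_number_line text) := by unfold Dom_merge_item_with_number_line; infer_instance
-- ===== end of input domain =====

-- B replaces A's index/look-ahead skip loop by a look-back fold that merges into the last appended line (different decomposition, same cost).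

-- ===== PORT A =====
-- A's while loop with index i, look-ahead at lines[i+1] and i += 2 skip, as lookahead recursion on the remaining lines
def pvLoopA : List String → List String
  | [] => []
  | [l] => [l]  -- current is stripped, but 'i + 1 < len(lines)' fails: the line is kept as-is
  | l :: next :: rest' =>
    let current := PySem.Str.strip l
    if current == "Item" || current == "Items" then
      let nsl := PySem.Str.lstrip next
      match nsl.toList with
      | c :: _ =>
        if PySem.Chars.isdigit c then (current ++ " " ++ nsl) :: pvLoopA rest'
        else l :: pvLoopA (next :: rest')
      | [] => l :: pvLoopA (next :: rest')
    else l :: pvLoopA (next :: rest')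
  termination_by lines => lines.length
  decreasing_by all_goals (simp only [List.length_cons]; omega)

def merge_item_with_number_line (text : String) : String :=
  PySem.Str.join "\n" (pvLoopA (PySem.Str.splitlines text))

-- ===== PORT B =====
def pvStepB (acc : List String) (line : String) : List String :=
  let ls := PySem.Str.lstrip line
  match ls.toList with
  | c :: _ =>
    if PySem.Chars.isdigit c then
      match acc.getLast? with
      | some last =>
        let p := PySem.Str.strip last
        if p == "Item" || p == "Items" then acc.dropLast ++ [p ++ " " ++ ls]
        else acc ++ [line]
      | none => acc ++ [line]
    else acc ++ [line]
  | [] => acc ++ [line]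

def merge_item_with_number_line_alt (text : String) : String :=
  PySem.Str.join "\n" ((PySem.Str.splitlines text).foldl pvStepB [])

-- ===== PRECONDITION & SPEC =====
def Spec_merge_item_with_number_line (text : String) (out : String) : Prop := out = merge_item_with_number_line_alt text
instance (text : String) (out : String) : Decidable (Spec_merge_item_with_number_line text out) := by unfold Spec_merge_item_with_number_line; infer_instance

-- ===== CLAIM (what is proved, stated in full; the proofs are below) =====
def Claim_equal_merge_item_with_number_line : Prop := ∀ (text : String), Dom_merge_item_with_number_line text → Spec_merge_item_with_number_line text (merge_item_with_number_line text)

-- ===== LEMMAS AND PROOFS =====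

-- whether the lstripped line starts with a digit (the merge trigger on the second line)
def pvDigitStart (l : String) : Bool :=
  match (PySem.Str.lstrip l).toList with
  | c :: _ => PySem.Chars.isdigit c
  | [] => false

-- invariant: no merge can happen across the acc / remaining-lines boundary
def pvOk (acc : List String) (lines : List String) : Prop :=
  ∀ last l rest, acc.getLast? = some last → lines = l :: rest →
    ¬ ((PySem.Str.strip last = "Item" ∨ PySem.Str.strip last = "Items") ∧ pvDigitStart l = true)

theorem pv_isspace_false_of_isdigit (c : Char) (h : PySem.Chars.isdigit c = true) :
    PySem.Chars.isspace c = false := by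
  simp only [PySem.Chars.isdigit, Bool.and_eq_true, decide_eq_true_eq, Char.le_def,
    UInt32.le_iff_toNat_le] at h
  rw [show ('0':Char).val.toNat = 48 from by decide, show ('9':Char).val.toNat = 57 from by decide] at h
  simp only [PySem.Chars.isspace, Char.toNat]
  simp only [Bool.or_eq_false_iff, Bool.and_eq_false_iff, decide_eq_false_iff_not]
  omega

theorem pv_strip_merged_len (w : List Char) (d : Char) (r : List Char)
    (hw : w = "Item".toList ∨ w = "Items".toList)
    (hd : PySem.Chars.isdigit d = true) :
    6 ≤ (PySem.Chars.strip (w ++ ' ' :: d :: r)).length := by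
  have hds : PySem.Chars.isspace d = false := pv_isspace_false_of_isdigit d hd
  rcases hw with rfl | rfl
  · rw [show "Item".toList = ['I','t','e','m'] from by decide]
    simp only [PySem.Chars.strip, PySem.Chars.lstrip, PySem.Chars.rstrip, List.cons_append,
      List.dropWhile_cons, show PySem.Chars.isspace 'I' = false from by decide, if_false,
      Bool.false_eq_true, List.nil_append]
    rw [show ('I' :: 't' :: 'e' :: 'm' :: ' ' :: d :: r).reverse = r.reverse ++ [d] ++ [' ','m','e','t','I'] from by simp]
    rw [List.dropWhile_append]
    split_ifs with h1
    · exfalso; rw [List.dropWhile_append] at h1; revert h1; split_ifs <;> simp [hds]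
    · rw [List.dropWhile_append]
      split_ifs <;> simp [List.dropWhile_cons_of_neg, hds]
  · rw [show "Items".toList = ['I','t','e','m','s'] from by decide]
    simp only [PySem.Chars.strip, PySem.Chars.lstrip, PySem.Chars.rstrip, List.cons_append,
      List.dropWhile_cons, show PySem.Chars.isspace 'I' = false from by decide, if_false,
      Bool.false_eq_true, List.nil_append]
    rw [show ('I' :: 't' :: 'e' :: 'm' :: 's' :: ' ' :: d :: r).reverse = r.reverse ++ [d] ++ [' ','s','m','e','t','I'] from by simp]
    rw [List.dropWhile_append]
    split_ifs with h1
    · exfalso; rw [List.dropWhile_append] at h1; revert h1; split_ifs <;> simp [hds]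
    · rw [List.dropWhile_append]
      split_ifs <;> simp [List.dropWhile_cons_of_neg, hds]

-- a merged line never strips back to 'Item'/'Items'
theorem pv_strip_merged_notin (cur nsl : String) (c : Char) (cs : List Char)
    (hcur : cur = "Item" ∨ cur = "Items") (hnsl : nsl.toList = c :: cs)
    (hd : PySem.Chars.isdigit c = true) :
    ¬ (PySem.Str.strip (cur ++ " " ++ nsl) = "Item" ∨ PySem.Str.strip (cur ++ " " ++ nsl) = "Items") := by
  have hlist : (cur ++ " " ++ nsl).toList = cur.toList ++ ' ' :: c :: cs := by
    simp [String.toList_append, hnsl]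
  have hlen := pv_strip_merged_len cur.toList c cs
    (by rcases hcur with rfl | rfl <;> simp) hd
  intro hcontra
  rcases hcontra with h | h <;>
  · have := congrArg (fun s => s.toList.length) h
    simp only [PySem.Str.strip, hlist] at this
    rw [String.toList_ofList] at this
    simp at this
    omega

theorem pvOk_head (acc : List String) (l : String) (rest : List String)
    (h : pvOk acc (l :: rest)) : pvOk acc [l] := by
  intro last l' r hg he
  cases he
  exact h last l rest hg rfl

theorem pvStepB_no_merge (acc : List String) (l : String) (h : pvOk acc [l]) :
    pvStepB acc l = acc ++ [l] := by
  simp only [pvStepB]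
  cases hls : (PySem.Str.lstrip l).toList with
  | nil => rfl
  | cons c cs =>
    cases hd : PySem.Chars.isdigit c with
    | false => simp [hd]
    | true =>
      cases hg : acc.getLast? with
      | none => simp [hd]
      | some last =>
        have hds : pvDigitStart l = true := by unfold pvDigitStart; rw [hls]; exact hd
        have hne : ¬ (PySem.Str.strip last = "Item" ∨ PySem.Str.strip last = "Items") :=
          fun hc => h last l [] hg rfl ⟨hc, hds⟩
        have hb : (PySem.Str.strip last == "Item" || PySem.Str.strip last == "Items") = false := by
          simp only [Bool.or_eq_false_iff, beq_eq_false_iff_ne, ne_eq]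
          exact ⟨fun hc => hne (Or.inl hc), fun hc => hne (Or.inr hc)⟩
        simp [hd, hb]

theorem pv_fold_eq (n : Nat) : ∀ (lines : List String), lines.length ≤ n → ∀ acc, pvOk acc lines →
    List.foldl pvStepB acc lines = acc ++ pvLoopA lines := by
  induction n with
  | zero =>
    intro lines hlen acc _
    have : lines = [] := List.eq_nil_of_length_eq_zero (Nat.le_zero.mp hlen)
    subst this; simp [pvLoopA]
  | succ n ih =>
    intro lines hlen acc hok
    match lines with
    | [] => simp [pvLoopA]
    | l :: rest =>
      have hstep : pvStepB acc l = acc ++ [l] :=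
        pvStepB_no_merge acc l (pvOk_head acc l rest hok)
      rw [List.foldl_cons, hstep]
      match rest with
      | [] => simp [pvLoopA]
      | next :: rest' =>
        simp only [pvLoopA]
        by_cases hcur : (PySem.Str.strip l == "Item" || PySem.Str.strip l == "Items") = true
        · rw [if_pos hcur]
          have hcurp : PySem.Str.strip l = "Item" ∨ PySem.Str.strip l = "Items" := by
            simpa using hcur
          cases hls : (PySem.Str.lstrip next).toList with
          | nil =>
            simp only
            rw [ih (next :: rest') (by simp at hlen ⊢; omega) (acc ++ [l])
              (by intro last l' r hg he
                  rw [List.getLast?_concat] at hg; cases hg; cases he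
                  rintro ⟨-, hdig⟩
                  unfold pvDigitStart at hdig; rw [hls] at hdig; exact absurd hdig (by simp))]
            simp
          | cons c cs =>
            simp only
            cases hd : PySem.Chars.isdigit c with
            | false =>
              simp only [Bool.false_eq_true, if_false]
              rw [ih (next :: rest') (by simp at hlen ⊢; omega) (acc ++ [l])
                (by intro last l' r hg he
                    rw [List.getLast?_concat] at hg; cases hg; cases he
                    rintro ⟨-, hdig⟩
                    unfold pvDigitStart at hdig; rw [hls] at hdig; simp [hd] at hdig)]
              simp
            | true =>
              -- B merges next into the just-appended l
              have hmerge : pvStepB (acc ++ [l]) next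
                  = acc ++ [PySem.Str.strip l ++ " " ++ PySem.Str.lstrip next] := by
                simp only [pvStepB]
                rw [hls]
                simp only [if_pos hd, List.getLast?_concat]
                rw [if_pos hcur, List.dropLast_concat]
              rw [List.foldl_cons, hmerge]
              have hnotin := pv_strip_merged_notin (PySem.Str.strip l) (PySem.Str.lstrip next)
                c cs hcurp hls hd
              rw [ih rest' (by simp at hlen; omega)
                (acc ++ [PySem.Str.strip l ++ " " ++ PySem.Str.lstrip next])
                (by intro last l' r hg he
                    rw [List.getLast?_concat] at hg; cases hg
                    rintro ⟨h1, -⟩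
                    exact hnotin h1)]
              simp
        · rw [if_neg hcur]
          have hcurp : ¬ (PySem.Str.strip l = "Item" ∨ PySem.Str.strip l = "Items") := by
            simpa using hcur
          rw [ih (next :: rest') (by simp at hlen ⊢; omega) (acc ++ [l])
            (by intro last l' r hg he
                rw [List.getLast?_concat] at hg; cases hg
                rintro ⟨h1, -⟩
                exact hcurp h1)]
          simp

-- ===== VERDICT (by name: the statement is the Claim_ definition above) =====
theorem merge_item_with_number_line_spec : Claim_equal_merge_item_with_number_line := by
  intro text _
  unfold Spec_merge_item_with_number_line merge_item_with_number_line merge_item_with_number_line_alt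
  rw [pv_fold_eq (PySem.Str.splitlines text).length _ le_rfl [] (by intro last l r hg he; simp at hg)]
  rfl
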